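-- pv_equiv track=rewrite | github.com/pluskal-lab/DreaMS | dreams/algorithms/murcko_hist/murcko_hist.py | murcko_hists_dist
-- ===== SOURCE A (Python) =====
-- from typing import List, Set, Dict, Union, Tuple
--
-- def murcko_hists_dist(h1: Dict[str, int], h2: Dict[str, int]) -> int:
--     """
--     Computes the distance between two Murcko histogram dictionaries.
--
--     The distance is calculated as the sum of absolute differences between
--     corresponding histogram values, including keys present in only one histogram.
--
--     Args:
--         h1 (Dict[str, int]): The first Murcko histogram dictionary.
--         h2 (Dict[str, int]): The second Murcko histogram dictionary.
--
--     Returns: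
--         int: The distance between the two histograms.
--     """
--     dist = 0
--     for k in set(h1.keys()) | set(h2.keys()):
--         if k not in h1.keys():
--             dist += h2[k]
--         elif k not in h2.keys():
--             dist += h1[k]
--         else:
--             dist += abs(h1[k] - h2[k])
--     return dist
-- ===== SOURCE B (Python) =====
-- def murcko_hists_dist(h1, h2):
--     """Distance via sort + two-pointer merge of the key-sorted item lists."""
--     a = sorted(h1.items(), key=lambda kv: kv[0])
--     b = sorted(h2.items(), key=lambda kv: kv[0])
--     i = j = 0
--     dist = 0
--     while i < len(a) and j < len(b):
--         ka, va = a[i]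
--         kb, vb = b[j]
--         if ka == kb:
--             dist += abs(va - vb)
--             i += 1
--             j += 1
--         elif ka < kb:
--             dist += va
--             i += 1
--         else:
--             dist += vb
--             j += 1
--     while i < len(a):
--         dist += a[i][1]
--         i += 1
--     while j < len(b):
--         dist += b[j][1]
--         j += 1
--     return dist
-- ===== Notes on version B (the rewrite author's own statement) =====
-- stated objective: alternative
-- what changed: B replaces the union-of-key-sets loop with a sort-and-merge algorithm: both item lists are sorted by key and a two-pointer merge accumulates abs differences on matching keys and raw values on unmatched ones, with trailing loops draining the leftovers; no union set and no per-key dict lookups.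
import Mathlib
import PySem

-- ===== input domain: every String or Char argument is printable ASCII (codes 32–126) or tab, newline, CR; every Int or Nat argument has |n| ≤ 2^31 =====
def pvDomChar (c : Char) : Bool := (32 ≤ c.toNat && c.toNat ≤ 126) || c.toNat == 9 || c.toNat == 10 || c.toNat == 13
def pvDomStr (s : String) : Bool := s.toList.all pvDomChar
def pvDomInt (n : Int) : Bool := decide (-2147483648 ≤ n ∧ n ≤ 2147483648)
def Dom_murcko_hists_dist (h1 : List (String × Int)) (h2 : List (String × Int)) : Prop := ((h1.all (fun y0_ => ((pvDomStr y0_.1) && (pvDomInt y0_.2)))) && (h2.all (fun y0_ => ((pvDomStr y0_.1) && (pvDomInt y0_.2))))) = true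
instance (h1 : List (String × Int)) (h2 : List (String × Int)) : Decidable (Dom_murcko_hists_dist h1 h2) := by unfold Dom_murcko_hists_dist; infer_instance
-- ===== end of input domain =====

-- B replaces the union-set loop with sort-by-key + two-pointer merge; same value everywhere (proved total).
-- ===== PORT A =====
def murcko_hists_dist (h1 : List (String × Int)) (h2 : List (String × Int)) : Int :=
  let d1 := PySem.Dict.ofList h1
  let d2 := PySem.Dict.ofList h2
  let ks : PySem.Set String := PySem.Set.union (PySem.Set.ofList d1.keys) d2.keys
  ks.foldl (fun dist k =>
    if ¬ d1.contains k then dist + d2.getD k 0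
    else if ¬ d2.contains k then dist + d1.getD k 0
    else dist + |d1.getD k 0 - d2.getD k 0|) 0

-- ===== PORT B =====
-- the two-pointer merge over the two key-sorted item lists, with the drain loops as the [] cases
def mergeDist : List (String × Int) → List (String × Int) → Int → Int
  | [], [], dist => dist
  | [], (_, vb) :: tb, dist => mergeDist [] tb (dist + vb)
  | (_, va) :: ta, [], dist => mergeDist ta [] (dist + va)
  | (ka, va) :: ta, (kb, vb) :: tb, dist =>
      if ka = kb then mergeDist ta tb (dist + |va - vb|)
      else if ka < kb then mergeDist ta ((kb, vb) :: tb) (dist + va)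
      else mergeDist ((ka, va) :: ta) tb (dist + vb)
  termination_by a b _ => a.length + b.length

def murcko_hists_dist_alt (h1 : List (String × Int)) (h2 : List (String × Int)) : Int :=
  let d1 := PySem.Dict.ofList h1
  let d2 := PySem.Dict.ofList h2
  mergeDist (PySem.List.sorted d1.items (fun kv => kv.1) false)
            (PySem.List.sorted d2.items (fun kv => kv.1) false) 0

-- ===== PRECONDITION & SPEC =====
def Spec_murcko_hists_dist (h1 : List (String × Int)) (h2 : List (String × Int)) (out : Int) : Prop := out = murcko_hists_dist_alt h1 h2
instance (h1 : List (String × Int)) (h2 : List (String × Int)) (out : Int) : Decidable (Spec_murcko_hists_dist h1 h2 out) := by unfold Spec_murcko_hists_dist; infer_instance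

-- ===== CLAIM (what is proved, stated in full; the proofs are below) =====
def Claim_equal_murcko_hists_dist : Prop := ∀ (h1 : List (String × Int)) (h2 : List (String × Int)), Dom_murcko_hists_dist h1 h2 → Spec_murcko_hists_dist h1 h2 (murcko_hists_dist h1 h2)

-- ===== LEMMAS AND PROOFS =====

-- first-match lookup with default 0, used only to characterise the merge
def lkp : List (String × Int) → String → Int
  | [], _ => 0
  | (k, v) :: t, x => if k = x then v else lkp t x

theorem lkp_of_not_mem (l : List (String × Int)) (x : String) (h : x ∉ l.map Prod.fst) :
    lkp l x = 0 := by
  induction l with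
  | nil => rfl
  | cons p t ih =>
    simp only [List.map_cons, List.mem_cons, not_or] at h
    cases p with
    | mk k v => simp only [lkp]; rw [if_neg (fun hkx => h.1 hkx.symm), ih h.2]

theorem lkp_of_mem (l : List (String × Int)) (k : String) (v : Int)
    (hnd : (l.map Prod.fst).Nodup) (hm : (k, v) ∈ l) : lkp l k = v := by
  induction l with
  | nil => simp at hm
  | cons p t ih =>
    simp only [List.map_cons, List.nodup_cons] at hnd
    rcases List.mem_cons.mp hm with h | h
    · subst h; simp [lkp]
    · cases p with
      | mk k' v' =>
        have hne : k' ≠ k := by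
          intro he; exact hnd.1 (he ▸ (List.mem_map.mpr ⟨(k, v), h, rfl⟩))
        simp only [lkp, if_neg hne]
        exact ih hnd.2 h

-- the merge computes: Σ over a (abs diff if the key is in b, else the value) + Σ over b's keys not in a
theorem merge_eq (a b : List (String × Int)) (dist : Int)
    (ha : a.Pairwise (fun p q => p.1 < q.1)) (hb : b.Pairwise (fun p q => p.1 < q.1)) :
    mergeDist a b dist = dist
      + (a.map (fun kv => if kv.1 ∈ b.map Prod.fst then |kv.2 - lkp b kv.1| else kv.2)).sum
      + (b.map (fun kv => if kv.1 ∈ a.map Prod.fst then 0 else kv.2)).sum := by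
  induction a, b, dist using mergeDist.induct with
  | case1 dist => simp [mergeDist]
  | case2 kb vb tb dist ih =>
    rw [mergeDist, ih (List.Pairwise.nil) (List.pairwise_cons.mp hb).2]
    simp; ring
  | case3 ka va ta dist ih =>
    rw [mergeDist, ih (List.pairwise_cons.mp ha).2 (List.Pairwise.nil)]
    simp; ring
  | case4 va ta kb vb tb dist ih =>
    rcases List.pairwise_cons.mp ha with ⟨hlta, hta⟩
    rcases List.pairwise_cons.mp hb with ⟨hltb, htb⟩
    rw [mergeDist, if_pos rfl, ih hta htb]
    have e1 : ∀ kv ∈ ta,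
        (if kv.1 ∈ tb.map Prod.fst then |kv.2 - lkp tb kv.1| else kv.2)
          = (if kv.1 ∈ ((kb, vb) :: tb).map Prod.fst then |kv.2 - lkp ((kb, vb) :: tb) kv.1| else kv.2) := by
      intro kv hkv
      have hne : kv.1 ≠ kb := fun h => absurd (h ▸ hlta kv hkv) (lt_irrefl kb)
      by_cases hm : kv.1 ∈ tb.map Prod.fst <;>
        simp [lkp, hm, hne, Ne.symm hne]
    have e2 : ∀ kv ∈ tb,
        (if kv.1 ∈ ta.map Prod.fst then (0 : Int) else kv.2)
          = (if kv.1 ∈ ((kb, va) :: ta).map Prod.fst then (0 : Int) else kv.2) := by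
      intro kv hkv
      have hne : kv.1 ≠ kb := fun h => absurd (h ▸ hltb kv hkv) (lt_irrefl kb)
      by_cases hm : kv.1 ∈ ta.map Prod.fst <;> simp [hm, hne]
    rw [List.map_congr_left e1, List.map_congr_left e2]
    simp [lkp]
    ring
  | case5 ka va ta kb vb tb dist hne hlt ih =>
    rcases List.pairwise_cons.mp ha with ⟨hlta, hta⟩
    rcases List.pairwise_cons.mp hb with ⟨hltb, htb⟩
    rw [mergeDist, if_neg hne, if_pos hlt, ih hta hb]
    have hnottb : ka ∉ tb.map Prod.fst := by
      intro h
      rcases List.mem_map.mp h with ⟨q, hq, hq1⟩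
      exact absurd (lt_trans hlt (hq1 ▸ hltb q hq)) (lt_irrefl ka)
    have e2 : ∀ kv ∈ (kb, vb) :: tb,
        (if kv.1 ∈ ta.map Prod.fst then (0 : Int) else kv.2)
          = (if kv.1 ∈ ((ka, va) :: ta).map Prod.fst then (0 : Int) else kv.2) := by
      intro kv hkv
      have hgt : ka < kv.1 := by
        rcases List.mem_cons.mp hkv with h | h
        · rw [h]; exact hlt
        · exact lt_trans hlt (hltb kv h)
      have hne' : kv.1 ≠ ka := fun h => absurd (h ▸ hgt) (lt_irrefl _)
      by_cases hm : kv.1 ∈ ta.map Prod.fst <;> simp [hm, hne']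
    rw [List.map_congr_left e2]
    simp [hne, hnottb]
    ring
  | case6 ka va ta kb vb tb dist hne hnlt ih =>
    rcases List.pairwise_cons.mp ha with ⟨hlta, hta⟩
    rcases List.pairwise_cons.mp hb with ⟨hltb, htb⟩
    have hlt : kb < ka := lt_of_le_of_ne (not_lt.mp hnlt) (fun h => hne h.symm)
    rw [mergeDist, if_neg hne, if_neg hnlt, ih ha htb]
    have hnotta : kb ∉ ta.map Prod.fst := by
      intro h
      rcases List.mem_map.mp h with ⟨q, hq, hq1⟩
      exact absurd (lt_trans hlt (hq1 ▸ hlta q hq)) (lt_irrefl kb)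
    have e1 : ∀ kv ∈ (ka, va) :: ta,
        (if kv.1 ∈ tb.map Prod.fst then |kv.2 - lkp tb kv.1| else kv.2)
          = (if kv.1 ∈ ((kb, vb) :: tb).map Prod.fst then |kv.2 - lkp ((kb, vb) :: tb) kv.1| else kv.2) := by
      intro kv hkv
      have hgt : kb < kv.1 := by
        rcases List.mem_cons.mp hkv with h | h
        · rw [h]; exact hlt
        · exact lt_trans hlt (hlta kv h)
      have hne' : kv.1 ≠ kb := fun h => absurd (h ▸ hgt) (lt_irrefl _)
      by_cases hm : kv.1 ∈ tb.map Prod.fst <;>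
        simp [lkp, hm, hne', Ne.symm hne']
    rw [List.map_congr_left e1]
    simp [Ne.symm hne, hnotta]
    ring

-- Folding Set.add over a duplicate-free list appends exactly the new elements.
theorem foldl_add_of_nodup (t : List String) : ∀ (s : List String), t.Nodup →
    t.foldl PySem.Set.add s = s ++ t.filter (fun k => decide (k ∉ s)) := by
  induction t with
  | nil => intro s _; simp
  | cons k t ih =>
    intro s hnd
    rcases List.nodup_cons.mp hnd with ⟨hk, hnd'⟩
    by_cases hm : k ∈ s
    · rw [List.foldl_cons, PySem.Set.add_of_mem hm, ih s hnd']
      simp [hm]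
    · rw [List.foldl_cons, PySem.Set.add_of_not_mem hm, ih _ hnd']
      have : (t.filter (fun x => decide (x ∉ s ++ [k]))) = t.filter (fun x => decide (x ∉ s)) := by
        apply List.filter_congr
        intro x hx
        have hxk : x ≠ k := fun h => hk (h ▸ hx)
        simp [hxk]
      rw [this]
      simp [hm]

theorem set_ofList_of_nodup (t : List String) (h : t.Nodup) : PySem.Set.ofList t = t := by
  have := foldl_add_of_nodup t [] h
  simpa [PySem.Set.ofList_eq_foldl] using this

-- a foldl whose step is "accumulator plus a per-element contribution" is a sum
theorem foldl_to_sum {b : Type} (l : List b) (f : Int → b → Int) (g : b → Int)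
    (h : ∀ d x, f d x = d + g x) (init : Int) :
    l.foldl f init = init + (l.map g).sum := by
  have hf : f = fun d x => d + g x := funext fun d => funext fun x => h d x
  subst hf
  exact PySem.List.foldl_add l g init

-- lkp over any nodup-keyed rearrangement of a dict's items is the dict's getD _ 0
theorem lkp_perm_items {l : List (String × Int)} {d : PySem.Dict String Int}
    (hperm : l.Perm d.items) (hnd : d.keys.Nodup) (k : String) : lkp l k = d.getD k 0 := by
  have hndl : (l.map Prod.fst).Nodup := ((hperm.map Prod.fst).nodup_iff).mpr hnd
  by_cases hc : d.contains k = true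
  · have hs : (d.get? k).isSome := by rw [← PySem.Dict.contains_eq_isSome_get?]; exact hc
    rcases Option.isSome_iff_exists.mp hs with ⟨v, hv⟩
    have hmem : (k, v) ∈ l := hperm.mem_iff.mpr (PySem.Dict.mem_items_of_get?_eq_some d hv)
    rw [lkp_of_mem l k v hndl hmem, PySem.Dict.getD_of_get?_eq_some d 0 hv]
  · have hnk : k ∉ d.keys := by
      rw [PySem.Dict.contains_iff_mem_keys] at hc; exact hc
    have hnl : k ∉ l.map Prod.fst := by
      intro h
      exact hnk (((hperm.map Prod.fst).mem_iff).mp h)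
    rw [lkp_of_not_mem l k hnl,
        PySem.Dict.getD_of_not_contains d 0 (by simpa using hc)]

-- ===== VERDICT (by name: the statement is the Claim_ definition above) =====
theorem murcko_hists_dist_spec : Claim_equal_murcko_hists_dist := by
  intro h1 h2 _
  unfold Spec_murcko_hists_dist murcko_hists_dist murcko_hists_dist_alt
  set d1 := PySem.Dict.ofList h1 with hd1
  set d2 := PySem.Dict.ofList h2 with hd2
  have n1 : d1.keys.Nodup := PySem.Dict.nodup_keys_ofList h1
  have n2 : d2.keys.Nodup := PySem.Dict.nodup_keys_ofList h2
  set s1 := PySem.List.sorted d1.items (fun kv => kv.1) false with hs1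
  set s2 := PySem.List.sorted d2.items (fun kv => kv.1) false with hs2
  have p1 : s1.Perm d1.items := PySem.List.sorted_perm _ _ _
  have p2 : s2.Perm d2.items := PySem.List.sorted_perm _ _ _
  -- key-sorted item lists are strictly key-increasing (keys are nodup)
  have strict : ∀ (s : List (String × Int)) (d : PySem.Dict String Int), s.Perm d.items → d.keys.Nodup →
      s.Pairwise (fun p q => (p.1 : String) ≤ q.1) → s.Pairwise (fun p q => p.1 < q.1) := by
    intro s d hp hnd hle
    have hnds : (s.map Prod.fst).Nodup := ((hp.map Prod.fst).nodup_iff).mpr hnd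
    have hne : s.Pairwise (fun p q => p.1 ≠ q.1) := List.pairwise_map.mp hnds
    exact (hle.and hne).imp (fun h => lt_of_le_of_ne h.1 h.2)
  have q1 : s1.Pairwise (fun p q => p.1 < q.1) :=
    strict s1 d1 p1 n1 (PySem.List.sorted_pairwise _ _)
  have q2 : s2.Pairwise (fun p q => p.1 < q.1) :=
    strict s2 d2 p2 n2 (PySem.List.sorted_pairwise _ _)
  rw [merge_eq s1 s2 0 q1 q2, zero_add]
  -- ===== A side: the union-set fold as two key sums =====
  have hunion : PySem.Set.union (PySem.Set.ofList d1.keys) d2.keys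
      = d1.keys ++ d2.keys.filter (fun k => decide (k ∉ d1.keys)) := by
    rw [PySem.Set.union, PySem.Set.update, set_ofList_of_nodup _ n1,
        foldl_add_of_nodup _ _ n2]
  simp only [hunion]
  have c1 : ∀ k, d1.contains k = decide (k ∈ d1.keys) := fun k => PySem.Dict.contains_eq_decide_mem_keys d1 k
  rw [foldl_to_sum _ _ (fun k => if ¬ d1.contains k then d2.getD k 0
        else if ¬ d2.contains k then d1.getD k 0 else |d1.getD k 0 - d2.getD k 0|)
      (by intro d k
          by_cases hc1 : d1.contains k = true
          · by_cases hc2 : d2.contains k = true <;> simp [hc1, hc2]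
          · simp [hc1]) 0]
  simp only [List.map_append, List.sum_append, zero_add]
  have seg1 : (d1.keys.map (fun k => if ¬ d1.contains k then d2.getD k 0
        else if ¬ d2.contains k then d1.getD k 0 else |d1.getD k 0 - d2.getD k 0|)).sum
      = (d1.keys.map (fun k => if d2.contains k then |d1.getD k 0 - d2.getD k 0| else d1.getD k 0)).sum := by
    apply congrArg
    apply List.map_congr_left
    intro k hk
    have : d1.contains k = true := by rw [c1 k]; simpa using hk
    by_cases h2c : d2.contains k = true <;> simp [this, h2c]
  have seg2 : ∀ t : List String,
      ((t.filter (fun k => decide (k ∉ d1.keys))).map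
        (fun k => if ¬ d1.contains k then d2.getD k 0
          else if ¬ d2.contains k then d1.getD k 0 else |d1.getD k 0 - d2.getD k 0|)).sum
      = (t.map (fun k => if ¬ d1.contains k then d2.getD k 0 else 0)).sum := by
    intro t
    induction t with
    | nil => simp
    | cons k t ih =>
      by_cases hm : k ∈ d1.keys
      · have hc : d1.contains k = true := by rw [c1 k]; simpa using hm
        rw [List.filter_cons_of_neg (by simpa using hm), ih,
            List.map_cons, List.sum_cons]
        simp [hc]
      · have hc : d1.contains k = false := by rw [c1 k]; simpa using hm
        rw [List.filter_cons_of_pos (by simpa using hm),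
            List.map_cons, List.sum_cons, ih, List.map_cons, List.sum_cons]
        simp [hc]
  rw [seg1, seg2 d2.keys]
  -- ===== B side: the two merge sums as the same key sums =====
  have mem2 : ∀ k : String, k ∈ s2.map Prod.fst ↔ d2.contains k = true := by
    intro k
    rw [(p2.map Prod.fst).mem_iff, PySem.Dict.contains_iff_mem_keys]
    rfl
  have mem1 : ∀ k : String, k ∈ s1.map Prod.fst ↔ d1.contains k = true := by
    intro k
    rw [(p1.map Prod.fst).mem_iff, PySem.Dict.contains_iff_mem_keys]
    rfl
  have lk2 : ∀ k, lkp s2 k = d2.getD k 0 := lkp_perm_items p2 n2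
  have sumB1 : (s1.map (fun kv => if kv.1 ∈ s2.map Prod.fst then |kv.2 - lkp s2 kv.1| else kv.2)).sum
      = (d1.keys.map (fun k => if d2.contains k then |d1.getD k 0 - d2.getD k 0| else d1.getD k 0)).sum := by
    rw [(p1.map _).sum_eq, PySem.Dict.items_eq_map_keys d1 n1 0, List.map_map]
    apply congrArg; apply List.map_congr_left
    intro k _
    simp only [Function.comp_def, mem2, lk2]
  have sumB2 : (s2.map (fun kv => if kv.1 ∈ s1.map Prod.fst then (0:Int) else kv.2)).sum
      = (d2.keys.map (fun k => if ¬ d1.contains k then d2.getD k 0 else 0)).sum := by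
    rw [(p2.map _).sum_eq, PySem.Dict.items_eq_map_keys d2 n2 0, List.map_map]
    apply congrArg; apply List.map_congr_left
    intro k _
    simp only [Function.comp_def, mem1]
    by_cases hc : d1.contains k = true <;> simp [hc]
  conv_rhs => rw [sumB1, sumB2]
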